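-- pv_equiv track=rewrite | github.com/ShodmonX/rushmodelbot | shared/services/scoring_service.py | score_y1
-- ===== SOURCE A (Python) =====
-- def score_y1(key_payload: dict, answer_payload: dict) -> tuple[int, list[int]]:
--     key = key_payload.get("answers", "")
--     ans = answer_payload.get("answers", "")
--     wrong = []
--     score = 0
--     for idx, (k, a) in enumerate(zip(key, ans), start=1):
--         if k == a:
--             score += 1
--         else:
--             wrong.append(idx)
--     return score, wrong
-- ===== SOURCE B (Python) =====
-- def score_y1(key_payload: dict, answer_payload: dict) -> tuple[int, list[int]]:
--     key = key_payload.get("answers", "")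
--     ans = answer_payload.get("answers", "")
--
--     def solve(lo, hi):
--         # score and 1-based wrong indices for positions lo..hi-1, by divide and conquer
--         if hi - lo == 0:
--             return 0, []
--         if hi - lo == 1:
--             return (1, []) if key[lo] == ans[lo] else (0, [lo + 1])
--         mid = (lo + hi) // 2
--         s1, w1 = solve(lo, mid)
--         s2, w2 = solve(mid, hi)
--         return s1 + s2, w1 + w2
--
--     return solve(0, min(len(key), len(ans)))
-- ===== Notes on version B (the rewrite author's own statement) =====
-- stated objective: alternative
-- what changed: B replaces A's single left-to-right accumulator loop over zip by a divide-and-conquer recursion on index ranges: each half is scored independently and the (score, wrong-list) results are merged by addition and concatenation; correct because score and mismatch indices are list homomorphisms under range splitting.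
import Mathlib
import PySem

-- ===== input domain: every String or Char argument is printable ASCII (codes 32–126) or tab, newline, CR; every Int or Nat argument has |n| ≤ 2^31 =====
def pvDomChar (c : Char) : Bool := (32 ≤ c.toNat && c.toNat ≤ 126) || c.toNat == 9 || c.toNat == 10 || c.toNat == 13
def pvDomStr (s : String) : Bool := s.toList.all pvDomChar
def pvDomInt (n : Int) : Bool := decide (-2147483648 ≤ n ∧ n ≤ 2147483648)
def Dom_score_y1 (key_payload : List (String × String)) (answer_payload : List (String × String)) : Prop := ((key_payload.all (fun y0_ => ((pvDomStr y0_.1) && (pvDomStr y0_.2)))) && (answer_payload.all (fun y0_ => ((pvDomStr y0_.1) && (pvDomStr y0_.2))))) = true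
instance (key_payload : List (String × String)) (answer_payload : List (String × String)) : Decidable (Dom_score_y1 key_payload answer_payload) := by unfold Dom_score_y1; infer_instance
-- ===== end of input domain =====

-- B scores by divide and conquer on index ranges instead of A's single accumulator loop; same return value ("alternative", not faster).

-- ===== PORT A =====
def score_y1 (key_payload : List (String × String)) (answer_payload : List (String × String)) : Int × List Int :=
  let key := (PySem.Dict.ofList key_payload).getD "answers" ""
  let ans := (PySem.Dict.ofList answer_payload).getD "answers" ""
  let st := (PySem.List.enumerate (key.toList.zip ans.toList) 1).foldl
    (fun (st : Int × List Int) p =>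
      if p.2.1 == p.2.2 then (st.1 + 1, st.2) else (st.1, st.2 ++ [p.1]))
    (0, [])
  (st.1, st.2)

-- ===== PORT B =====
-- key[lo] / ans[lo] are ported with getD: solve is only called with lo < hi ≤ min of the
-- lengths, so the index is always in range and getD is exact there.
def pvSolveB (key ans : List Char) (lo hi : Nat) : Int × List Int :=
  if hi - lo = 0 then (0, [])
  else if hi - lo = 1 then
    if key.getD lo ' ' = ans.getD lo ' ' then (1, []) else (0, [(lo : Int) + 1])
  else
    let mid := (lo + hi) / 2
    let r1 := pvSolveB key ans lo mid
    let r2 := pvSolveB key ans mid hi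
    (r1.1 + r2.1, r1.2 ++ r2.2)
termination_by hi - lo
decreasing_by all_goals omega

def score_y1_alt (key_payload : List (String × String)) (answer_payload : List (String × String)) : Int × List Int :=
  let key := (PySem.Dict.ofList key_payload).getD "answers" ""
  let ans := (PySem.Dict.ofList answer_payload).getD "answers" ""
  pvSolveB key.toList ans.toList 0 (min key.toList.length ans.toList.length)

-- ===== PRECONDITION & SPEC =====
def Spec_score_y1 (key_payload : List (String × String)) (answer_payload : List (String × String)) (out : Int × List Int) : Prop := out = score_y1_alt key_payload answer_payload
instance (key_payload : List (String × String)) (answer_payload : List (String × String)) (out : Int × List Int) : Decidable (Spec_score_y1 key_payload answer_payload out) := by unfold Spec_score_y1; infer_instance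

-- ===== CLAIM =====
def Claim_equal_score_y1 : Prop := ∀ (key_payload : List (String × String)) (answer_payload : List (String × String)), Dom_score_y1 key_payload answer_payload → Spec_score_y1 key_payload answer_payload (score_y1 key_payload answer_payload)

-- ===== LEMMAS AND PROOFS =====

-- Reference value: score and 1-based wrong indices over a given list of 0-based positions.
def pvCnt (key ans : List Char) (l : List Nat) : Int × List Int :=
  (((l.filter fun i => key.getD i ' ' == ans.getD i ' ').length : Int),
   (l.filter fun i => !(key.getD i ' ' == ans.getD i ' ')).map (fun i => (i : Int) + 1))

lemma pvCnt_append (key ans : List Char) (l1 l2 : List Nat) :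
    pvCnt key ans (l1 ++ l2)
      = ((pvCnt key ans l1).1 + (pvCnt key ans l2).1,
         (pvCnt key ans l1).2 ++ (pvCnt key ans l2).2) := by
  simp [pvCnt, List.filter_append]

lemma pvSolveB_eq_aux (key ans : List Char) : ∀ (n lo hi : Nat), hi - lo ≤ n →
    pvSolveB key ans lo hi = pvCnt key ans (List.range' lo (hi - lo)) := by
  intro n
  induction n with
  | zero =>
    intro lo hi h
    have h0 : hi - lo = 0 := by omega
    rw [pvSolveB.eq_def, if_pos h0, h0]
    simp [pvCnt]
  | succ m ih =>
    intro lo hi h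
    rw [pvSolveB.eq_def]
    by_cases h0 : hi - lo = 0
    · rw [if_pos h0, h0]
      simp [pvCnt]
    · by_cases h1 : hi - lo = 1
      · rw [if_neg h0, if_pos h1, h1]
        by_cases hc : key.getD lo ' ' = ans.getD lo ' ' <;>
          simp_all [pvCnt, List.range'_one]
      · rw [if_neg h0, if_neg h1]
        have hm1 : lo ≤ (lo + hi) / 2 := by omega
        have hm2 : (lo + hi) / 2 ≤ hi := by omega
        have hsplit : List.range' lo (hi - lo)
            = List.range' lo ((lo + hi) / 2 - lo) ++ List.range' ((lo + hi) / 2) (hi - (lo + hi) / 2) := by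
          have h := List.range'_append (s := lo) (m := (lo + hi) / 2 - lo) (n := hi - (lo + hi) / 2) (step := 1)
          simp only [Nat.one_mul] at h
          rw [show lo + ((lo + hi) / 2 - lo) = (lo + hi) / 2 by omega] at h
          rw [show ((lo + hi) / 2 - lo) + (hi - (lo + hi) / 2) = hi - lo by omega] at h
          exact h.symm
        rw [hsplit, pvCnt_append,
          ← ih lo ((lo + hi) / 2) (by omega), ← ih ((lo + hi) / 2) hi (by omega)]

lemma pvSolveB_eq (key ans : List Char) (lo hi : Nat) :
    pvSolveB key ans lo hi = pvCnt key ans (List.range' lo (hi - lo)) :=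
  pvSolveB_eq_aux key ans (hi - lo) lo hi le_rfl

-- A's loop over a prefix of the zipped pairs equals pvCnt over the matching index range.
lemma scoreA_loop (key ans : List Char) (n : Nat) (hn : n ≤ (key.zip ans).length) :
    (PySem.List.enumerate ((key.zip ans).take n) 1).foldl
      (fun (st : Int × List Int) p =>
        if p.2.1 == p.2.2 then (st.1 + 1, st.2) else (st.1, st.2 ++ [p.1]))
      (0, [])
    = pvCnt key ans (List.range' 0 n) := by
  induction n with
  | zero => simp [pvCnt]
  | succ m ih =>
    have hm : m ≤ (key.zip ans).length := by omega
    have hmlt : m < (key.zip ans).length := by omega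
    have htake : (key.zip ans).take (m + 1) = (key.zip ans).take m ++ [(key.zip ans)[m]] :=
      List.take_succ_eq_append_getElem hmlt
    have hrange : List.range' 0 (m + 1) = List.range' 0 m ++ [m] := by
      simpa using List.range'_1_concat (s := 0) (n := m)
    have hmk : m < key.length := by
      rw [List.length_zip] at hmlt; omega
    have hma : m < ans.length := by
      rw [List.length_zip] at hmlt; omega
    have hlen : ((key.zip ans).take m).length = m := by
      simp [List.length_take]; omega
    have hgk : key.getD m ' ' = key[m] := List.getD_eq_getElem key ' ' hmk
    have hga : ans.getD m ' ' = ans[m] := List.getD_eq_getElem ans ' ' hma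
    rw [htake, PySem.List.enumerate_append, List.foldl_append, ih hm, hrange, pvCnt_append]
    clear htake hrange ih hn hm
    by_cases hc : key[m] = ans[m]
    · simp_all [PySem.List.enumerate_cons, PySem.List.enumerate_nil, pvCnt]
    · simp_all [PySem.List.enumerate_cons, PySem.List.enumerate_nil, pvCnt]
      omega

-- ===== VERDICT =====
theorem score_y1_spec : Claim_equal_score_y1 := by
  intro kp ap _
  unfold Spec_score_y1 score_y1 score_y1_alt
  simp only []
  set key := ((PySem.Dict.ofList kp).getD "answers" "").toList with hk
  set ans := ((PySem.Dict.ofList ap).getD "answers" "").toList with ha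
  have hmin : min key.length ans.length = (key.zip ans).length := (List.length_zip ..).symm
  have hA := scoreA_loop key ans (key.zip ans).length le_rfl
  rw [List.take_length] at hA
  rw [hA, pvSolveB_eq, hmin]
  simp
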